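-- pv_equiv track=rewrite | github.com/as3contender/x5-ner | scripts/replace_after_prepositions.py | replace_after_prepositions
-- ===== SOURCE A (Python) =====
-- from typing import List, Tuple, Optional, Set
--
-- def normalize_token(text: str) -> str:
--     return text.strip().strip("\t\r\n .,!?:;\"'«»()[]{}-—").lower()
--
-- def replace_after_prepositions(
--     sample: str, annotations: List[Tuple[int, int, str]], preps: Set[str]
-- ) -> List[Tuple[int, int, str]]:
--     if not annotations:
--         return annotations
--     # Work on a mutable copy
--     mutable: List[List[object]] = [[a, b, c] for (a, b, c) in annotations]
--     i = 0
--     while i < len(mutable) - 1: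
--         start, end, label = mutable[i]
--         if label == "O":
--             token_text = sample[start:end]
--             if normalize_token(token_text) in preps:
--                 # Set the next segment label to 'O'
--                 nxt = mutable[i + 1]
--                 nxt[2] = "O"
--                 # Note: we only change the immediate next segment, as requested
--         i += 1
--     return [(int(a), int(b), str(c)) for (a, b, c) in mutable]
-- ===== SOURCE B (Python) =====
-- def normalize_token(text: str) -> str:
--     return text.strip().strip("\t\r\n .,!?:;\"'«»()[]{}-—").lower()
--
-- def replace_after_prepositions(sample, annotations, preps):
--     if not annotations:
--         return annotations
--     result = []
--     force_O = False
--     for a, b, c in annotations: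
--         label = "O" if force_O else str(c)
--         result.append((int(a), int(b), label))
--         force_O = label == "O" and normalize_token(sample[a:b]) in preps
--     return result
-- ===== Notes on version B (the rewrite author's own statement) =====
-- stated objective: simpler
-- what changed: Replaced A's index-based while-loop that mutates the next element of a mutable copy in place (plus a final cast pass) with a single forward pass that builds the output list while carrying one boolean flag (previous processed label was 'O' and its text is a preposition).
import Mathlib
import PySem

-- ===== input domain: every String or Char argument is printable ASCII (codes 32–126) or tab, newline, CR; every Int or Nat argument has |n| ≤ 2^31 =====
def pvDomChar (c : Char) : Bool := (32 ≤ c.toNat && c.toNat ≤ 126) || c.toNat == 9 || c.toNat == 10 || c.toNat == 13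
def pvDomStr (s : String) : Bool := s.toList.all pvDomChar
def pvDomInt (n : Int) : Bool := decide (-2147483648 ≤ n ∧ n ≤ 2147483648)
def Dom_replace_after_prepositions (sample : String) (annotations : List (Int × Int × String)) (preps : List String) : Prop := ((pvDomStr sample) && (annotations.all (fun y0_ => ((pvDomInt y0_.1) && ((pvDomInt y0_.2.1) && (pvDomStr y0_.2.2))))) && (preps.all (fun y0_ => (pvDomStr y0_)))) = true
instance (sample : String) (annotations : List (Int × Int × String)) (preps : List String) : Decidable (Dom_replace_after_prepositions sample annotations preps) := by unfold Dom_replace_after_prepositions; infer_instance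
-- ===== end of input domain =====

-- B replaces A's index-based mutate-the-next-element loop by a single forward pass
-- carrying a boolean flag and building a fresh output list (objective: simpler).

-- ===== PORT A =====
-- normalize_token (used by both Pythons, identical source in Source A and Source B)
def normalize_token (text : String) : String :=
  PySem.Str.lower (PySem.Str.stripChars (PySem.Str.strip text) "\t\r\n .,!?:;\"'«»()[]{}-—")

-- one iteration of A's 'while i < len(mutable) - 1' body, at index i
def pyStepA (sample : String) (preps : List String) (m : List (Int × Int × String)) (i : Nat) : List (Int × Int × String) :=
  match m[i]? with
  | some (start, stop, label) =>
      if label == "O" then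
        if preps.contains (normalize_token (PySem.Str.slice sample (some start) (some stop))) then
          m.modify (i + 1) (fun t => (t.1, t.2.1, "O"))
        else m
      else m
  | none => m

def replace_after_prepositions (sample : String) (annotations : List (Int × Int × String)) (preps : List String) : List (Int × Int × String) :=
  if annotations = [] then annotations
  else
    let mutable := annotations.map (fun t => (t.1, t.2.1, t.2.2))
    let final := (List.range (mutable.length - 1)).foldl (pyStepA sample preps) mutable
    final.map (fun t => (t.1, t.2.1, t.2.2))

-- ===== PORT B =====
def pyGoB (sample : String) (preps : List String) : Bool → List (Int × Int × String) → List (Int × Int × String)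
  | _, [] => []
  | forceO, (a, b, c) :: rest =>
      let label := if forceO then "O" else c
      (a, b, label) ::
        pyGoB sample preps
          (label == "O" && preps.contains (normalize_token (PySem.Str.slice sample (some a) (some b)))) rest

def replace_after_prepositions_alt (sample : String) (annotations : List (Int × Int × String)) (preps : List String) : List (Int × Int × String) :=
  if annotations = [] then annotations
  else pyGoB sample preps false annotations

-- ===== PRECONDITION & SPEC =====
def Spec_replace_after_prepositions (sample : String) (annotations : List (Int × Int × String)) (preps : List String) (out : List (Int × Int × String)) : Prop := out = replace_after_prepositions_alt sample annotations preps
instance (sample : String) (annotations : List (Int × Int × String)) (preps : List String) (out : List (Int × Int × String)) : Decidable (Spec_replace_after_prepositions sample annotations preps out) := by unfold Spec_replace_after_prepositions; infer_instance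

-- ===== CLAIM (what is proved, stated in full; the proofs are below) =====
def Claim_equal_replace_after_prepositions : Prop := ∀ (sample : String) (annotations : List (Int × Int × String)) (preps : List String), Dom_replace_after_prepositions sample annotations preps → Spec_replace_after_prepositions sample annotations preps (replace_after_prepositions sample annotations preps)

-- ===== LEMMAS AND PROOFS =====

-- A's step at an index ≥ 1 leaves the head alone and acts on the tail
lemma pyStepA_cons (sample : String) (preps : List String)
    (x : Int × Int × String) (m : List (Int × Int × String)) (i : Nat) :
    pyStepA sample preps (x :: m) (i + 1) = x :: pyStepA sample preps m i := by
  unfold pyStepA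
  cases h : m[i]? with
  | none => simp [h]
  | some t =>
    obtain ⟨a, b, c⟩ := t
    simp only [List.getElem?_cons_succ, h]
    split_ifs <;> simp

lemma foldl_pyStepA_map_succ (sample : String) (preps : List String) :
    ∀ (idxs : List Nat) (x : Int × Int × String) (m : List (Int × Int × String)),
    List.foldl (pyStepA sample preps) (x :: m) (idxs.map Nat.succ)
      = x :: List.foldl (pyStepA sample preps) m idxs := by
  intro idxs
  induction idxs with
  | nil => intro x m; simp
  | cons i rest ih =>
    intro x m
    simp only [List.map_cons, List.foldl_cons, Nat.succ_eq_add_one, pyStepA_cons]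
    exact ih x _

-- the heart: A's index loop computes B's flag-carrying pass
lemma loopA_eq_goB (sample : String) (preps : List String) :
    ∀ (n : Nat) (m : List (Int × Int × String)), m.length ≤ n →
    (List.range (m.length - 1)).foldl (pyStepA sample preps) m = pyGoB sample preps false m := by
  intro n
  induction n with
  | zero =>
    intro m hm
    have : m = [] := List.eq_nil_of_length_eq_zero (Nat.le_zero.mp hm)
    subst this; simp [pyGoB]
  | succ n ih =>
    intro m hm
    match m with
    | [] => simp [pyGoB]
    | [x] =>
      obtain ⟨a, b, c⟩ := x
      simp [pyGoB]
    | (a, b, c) :: y :: r =>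
      have hlen : ((a, b, c) :: y :: r).length - 1 = r.length + 1 := by simp
      rw [hlen, List.range_succ_eq_map, List.foldl_cons]
      -- evaluate the step at index 0
      have hstep : pyStepA sample preps ((a, b, c) :: y :: r) 0
          = (a, b, c) ::
            (if (c == "O" && preps.contains (normalize_token (PySem.Str.slice sample (some a) (some b))))
             then (y :: r).modify 0 (fun u => (u.1, u.2.1, "O")) else y :: r) := by
        unfold pyStepA
        simp only [List.getElem?_cons_zero]
        split_ifs with h1 h2 <;> simp_all [List.modify]
      rw [hstep]
      set f := (c == "O" && preps.contains (normalize_token (PySem.Str.slice sample (some a) (some b)))) with hf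
      set t' := (if f then (y :: r).modify 0 (fun u => (u.1, u.2.1, "O")) else y :: r) with ht'
      have hlen' : t'.length = r.length + 1 := by
        rw [ht']; split_ifs <;> simp
      rw [foldl_pyStepA_map_succ]
      have hrange : r.length = t'.length - 1 := by omega
      rw [hrange, ih t' (by simp at hm ⊢; omega)]
      have hforced : pyGoB sample preps false t' = pyGoB sample preps f (y :: r) := by
        rw [ht']
        cases f with
        | false => simp
        | true =>
          obtain ⟨ya, yb, yc⟩ := y
          simp [pyGoB]
      rw [hforced]
      conv_rhs => rw [show pyGoB sample preps false ((a, b, c) :: y :: r)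
        = (a, b, c) :: pyGoB sample preps f (y :: r) from by simp [pyGoB, hf]]

-- ===== VERDICT (by name: the statement is the Claim_ definition above) =====
theorem replace_after_prepositions_spec : Claim_equal_replace_after_prepositions := by
  intro sample annotations preps _
  unfold Spec_replace_after_prepositions replace_after_prepositions replace_after_prepositions_alt
  by_cases h : annotations = []
  · simp [h]
  · simp only [h, if_false]
    have hmap : annotations.map (fun t => (t.1, t.2.1, t.2.2)) = annotations := by simp
    rw [hmap, loopA_eq_goB sample preps annotations.length annotations le_rfl]
    simp
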